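-- pv_equiv track=rewrite | github.com/Techinoco/task_mapping_fully_SE | moga_taskmapping_bbdlp.py | count_hops
-- ===== SOURCE A (Python) =====
-- def count_hops(i,value,constants_in_row):
--     hops = 0
--     for k in range(i-1,-1,-1):
--         if value not in constants_in_row[k] or (value in constants_in_row[k] and constants_in_row[k][value] != 'A'):
--             hops += 1
--         if value in constants_in_row[k] and constants_in_row[k][value] == 'A':
--             hops += 1
--             return hops
-- ===== SOURCE B (Python) =====
-- def count_hops(i, value, constants_in_row):
--     matches = [k for k in range(i)
--                if value in constants_in_row[k] and constants_in_row[k][value] == 'A']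
--     if not matches:
--         return None
--     return i - matches[-1]
-- ===== Notes on version B (the rewrite author's own statement) =====
-- stated objective: simpler
-- what changed: Replaced the backward early-return loop with a running hop counter by a forward comprehension collecting all matching indices and the closed form i - matches[-1].
import Mathlib
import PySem

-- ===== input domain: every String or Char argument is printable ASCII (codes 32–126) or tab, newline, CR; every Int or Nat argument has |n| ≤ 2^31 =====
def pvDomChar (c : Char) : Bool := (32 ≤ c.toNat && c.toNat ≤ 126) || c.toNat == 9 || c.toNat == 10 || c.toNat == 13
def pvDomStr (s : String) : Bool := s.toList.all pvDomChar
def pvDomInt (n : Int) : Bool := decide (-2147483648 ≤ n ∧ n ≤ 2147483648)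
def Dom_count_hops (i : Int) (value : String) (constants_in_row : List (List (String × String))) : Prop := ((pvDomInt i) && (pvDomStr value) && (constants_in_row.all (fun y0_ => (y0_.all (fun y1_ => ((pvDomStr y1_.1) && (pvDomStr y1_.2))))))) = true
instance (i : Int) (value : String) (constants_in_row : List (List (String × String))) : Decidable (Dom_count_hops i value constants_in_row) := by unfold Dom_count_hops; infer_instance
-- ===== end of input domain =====

-- B replaces A's backward early-return loop with a running counter by a forward
-- collection of all matching indices and the closed form i - matches[-1] (objective: simpler).

-- dict lookup 'row[value]' with first-match semantics; 'value in row' = result is some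
def pvLookup (row : List (String × String)) (value : String) : Option String :=
  (row.find? (fun p => p.1 == value)).map (·.2)

-- ===== PORT A =====
-- A's loop: for k in range(i-1,-1,-1), accumulator 'hops'; the index access
-- constants_in_row[k] is pyGet? (none = IndexError, excluded by Pre_).
def count_hops_go (value : String) (rows : List (List (String × String))) :
    List Int → Int → Option Int
  | [], _ => none
  | k :: ks, hops =>
    match PySem.List.pyGet? rows k with
    | none => none
    | some row =>
      let hops1 := if pvLookup row value = none ∨
                      (pvLookup row value ≠ none ∧ pvLookup row value ≠ some "A")
                   then hops + 1 else hops
      if pvLookup row value ≠ none ∧ pvLookup row value = some "A"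
      then some (hops1 + 1)
      else count_hops_go value rows ks hops1

def count_hops (i : Int) (value : String) (constants_in_row : List (List (String × String))) : Option Int :=
  count_hops_go value constants_in_row (PySem.List.pyRange (i - 1) (-1) (-1)) 0

-- ===== PORT B =====
def count_hops_alt (i : Int) (value : String) (constants_in_row : List (List (String × String))) : Option Int :=
  let ms := (PySem.List.pyRange 0 i 1).filter (fun k =>
    match PySem.List.pyGet? constants_in_row k with
    | none => false
    | some row => pvLookup row value == some "A")
  match PySem.List.pyGet? ms (-1) with
  | none => none
  | some k => some (i - k)

-- ===== PRECONDITION & SPEC =====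
-- Both Pythons raise IndexError exactly when i > len(constants_in_row): excluded.
def Pre_count_hops (i : Int) (value : String) (constants_in_row : List (List (String × String))) : Prop :=
  i ≤ (constants_in_row.length : Int)
instance (i : Int) (value : String) (constants_in_row : List (List (String × String))) : Decidable (Pre_count_hops i value constants_in_row) := by unfold Pre_count_hops; infer_instance

def pvWitness_count_hops : Int × String × (List (List (String × String))) :=
  (3, "x", [[("x", "A")], [("x", "B")], [("y", "A")]])

def Spec_count_hops (i : Int) (value : String) (constants_in_row : List (List (String × String))) (out : Option Int) : Prop := out = count_hops_alt i value constants_in_row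
instance (i : Int) (value : String) (constants_in_row : List (List (String × String))) (out : Option Int) : Decidable (Spec_count_hops i value constants_in_row out) := by unfold Spec_count_hops; infer_instance

-- ===== CLAIM (what is proved, stated in full; the proofs are below) =====
def Claim_equal_count_hops : Prop := ∀ (i : Int) (value : String) (constants_in_row : List (List (String × String))), Dom_count_hops i value constants_in_row → Pre_count_hops i value constants_in_row → Spec_count_hops i value constants_in_row (count_hops i value constants_in_row)

-- ===== LEMMAS AND PROOFS =====

-- B's filter predicate
def pvP (rows : List (List (String × String))) (value : String) (k : Int) : Bool :=
  match PySem.List.pyGet? rows k with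
  | none => false
  | some row => pvLookup row value == some "A"

lemma go_cons (value : String) (rows : List (List (String × String)))
    (k : Int) (ks : List Int) (hops : Int) (row : List (String × String))
    (h : PySem.List.pyGet? rows k = some row) :
    count_hops_go value rows (k :: ks) hops =
      (if pvLookup row value ≠ none ∧ pvLookup row value = some "A"
       then some ((if pvLookup row value = none ∨
                      (pvLookup row value ≠ none ∧ pvLookup row value ≠ some "A")
                   then hops + 1 else hops) + 1)
       else count_hops_go value rows ks
              (if pvLookup row value = none ∨
                  (pvLookup row value ≠ none ∧ pvLookup row value ≠ some "A")
               then hops + 1 else hops)) := by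
  rw [count_hops_go, h]

lemma pv_main (rows : List (List (String × String))) (value : String) :
    ∀ (n : Nat) (hops : Int),
      (∀ k : Int, 0 ≤ k → k < (n : Int) → (PySem.List.pyGet? rows k).isSome) →
      count_hops_go value rows ((PySem.List.pyRange 0 (n : Int) 1).reverse) hops =
        (match ((PySem.List.pyRange 0 (n : Int) 1).filter (pvP rows value)).getLast? with
         | none => none
         | some k => some (hops + ((n : Int) - k))) := by
  intro n
  induction n with
  | zero => intro hops _; simp [PySem.List.pyRange_one_eq_nil, count_hops_go]
  | succ n ih =>
    intro hops hsome
    have hsplit : PySem.List.pyRange 0 ((n : Int) + 1) 1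
        = PySem.List.pyRange 0 (n : Int) 1 ++ [(n : Int)] :=
      PySem.List.pyRange_one_succ_right (by positivity)
    push_cast
    rw [hsplit, List.reverse_append, List.filter_append]
    have hrow : (PySem.List.pyGet? rows (n : Int)).isSome :=
      hsome _ (by positivity) (by push_cast; omega)
    obtain ⟨row, hrw⟩ := Option.isSome_iff_exists.mp hrow
    simp only [List.reverse_cons, List.reverse_nil, List.nil_append, List.cons_append]
    rw [go_cons _ _ _ _ _ _ hrw]
    by_cases hA : pvLookup row value = some "A"
    · have hP : pvP rows value (n : Int) = true := by simp [pvP, hrw, hA]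
      rw [if_pos ⟨by simp [hA], hA⟩, if_neg (by simp [hA])]
      simp only [List.filter_cons, hP, if_true, List.filter_nil]
      rw [List.getLast?_concat]
      congr 1
      ring
    · have hP : pvP rows value (n : Int) = false := by simp [pvP, hrw, hA]
      have hrec := ih (hops + 1) (fun k hk0 hkn => hsome k hk0 (by omega))
      have hc1 : pvLookup row value = none ∨
          (pvLookup row value ≠ none ∧ pvLookup row value ≠ some "A") := by
        by_cases hnone : pvLookup row value = none
        · exact Or.inl hnone
        · exact Or.inr ⟨hnone, hA⟩
      rw [if_neg (fun h => hA h.2), if_pos hc1]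
      rw [hrec]
      simp only [List.filter_cons, hP, Bool.false_eq_true, if_false, List.filter_nil,
        List.append_nil]
      cases hL : (List.filter (pvP rows value) (PySem.List.pyRange 0 (n:Int) 1)).getLast? with
      | none => rfl
      | some k =>
        congr 1
        ring

-- ===== VERDICT (by name: the statement is the Claim_ definition above) =====
theorem count_hops_spec : Claim_equal_count_hops := by
  intro i value rows _ hpre
  unfold Spec_count_hops count_hops count_hops_alt
  by_cases hi : i ≤ 0
  · rw [PySem.List.pyRange_neg_one_eq_nil (by omega), PySem.List.pyRange_one_eq_nil hi]
    simp [count_hops_go, PySem.List.pyGet?]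
  · have hi' : 0 < i := by omega
    have hrev : PySem.List.pyRange (i - 1) (-1) (-1) = (PySem.List.pyRange 0 i 1).reverse := by
      have := PySem.List.pyRange_neg_one_eq_reverse (i - 1) (-1)
      simpa using this
    have hn : ((i.toNat : Nat) : Int) = i := Int.toNat_of_nonneg (by omega)
    have hsome : ∀ k : Int, 0 ≤ k → k < ((i.toNat : Nat) : Int) → (PySem.List.pyGet? rows k).isSome := by
      intro k hk0 hkn
      rw [hn] at hkn
      rw [PySem.List.pyGet?_eq_some_getElem rows hk0 (by unfold Pre_count_hops at hpre; omega)]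
      rfl
    have := pv_main rows value i.toNat 0 hsome
    rw [hn] at this
    rw [hrev, this]
    show (match ((PySem.List.pyRange 0 i 1).filter (pvP rows value)).getLast? with
          | none => none
          | some k => some ((0:Int) + (i - k))) =
         (match PySem.List.pyGet? ((PySem.List.pyRange 0 i 1).filter (pvP rows value)) (-1) with
          | none => none
          | some k => some (i - k))
    rw [PySem.List.pyGet?_neg_one]
    cases hL : ((PySem.List.pyRange 0 i 1).filter (pvP rows value)).getLast? with
    | none => rfl
    | some k =>
      congr 1
      ring
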